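-- pv_equiv track=rewrite | github.com/justl3as/SWD-Python-Developer-Test | Problem 1/2 - Find index of largest value/main.py | find_index_largest_value
-- ===== SOURCE A (Python) =====
-- from ast import List
--
-- def find_index_largest_value(numbers: List) -> int:
--     """Finds the index of the largest value in a list.
--
--     Args:
--         nums: The list to search.
--
--     Returns:
--         The index of the largest value in the list.
--     """
--
--     if not numbers:
--         return 0
--
--     max_value = numbers[0]
--     max_index = 0
--
--     for i, value in enumerate(numbers):
--         if value >= max_value:
--             max_value = value
--             max_index = i
--
--     return max_index
-- ===== SOURCE B (Python) =====
-- def find_index_largest_value(numbers):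
--     """Finds the index of the largest value in a list (last index on ties)."""
--     if not numbers:
--         return 0
--     max_value = max(numbers)
--     return len(numbers) - 1 - numbers[::-1].index(max_value)
-- ===== Notes on version B (the rewrite author's own statement) =====
-- stated objective: idiomatic
-- what changed: Replaces the running-max enumerate scan keeping (max_value, max_index) state with a two-pass decomposition: max() to find the largest value, then locating its last occurrence via reversed .index().
import Mathlib
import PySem

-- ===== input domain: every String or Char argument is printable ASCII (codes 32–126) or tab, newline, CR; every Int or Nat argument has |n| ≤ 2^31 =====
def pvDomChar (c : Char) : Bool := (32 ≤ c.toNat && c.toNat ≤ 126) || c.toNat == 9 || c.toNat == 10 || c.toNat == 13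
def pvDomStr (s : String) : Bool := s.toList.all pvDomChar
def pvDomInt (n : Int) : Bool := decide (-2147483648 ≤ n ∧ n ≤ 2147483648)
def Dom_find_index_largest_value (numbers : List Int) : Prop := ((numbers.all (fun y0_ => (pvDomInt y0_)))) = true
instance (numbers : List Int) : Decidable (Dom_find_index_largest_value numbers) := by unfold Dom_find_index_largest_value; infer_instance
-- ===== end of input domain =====

-- B replaces A's single running-max scan with an idiomatic two-pass decomposition
-- (max(), then last occurrence via reversed index); same cost, last-tie behaviour preserved.

-- ===== PORT A =====
def find_index_largest_value (numbers : List Int) : Int :=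
  match numbers with
  | [] => 0
  | n0 :: _ =>
    ((PySem.List.enumerate numbers 0).foldl
      (fun (s : Int × Int) (p : Int × Int) => if p.2 ≥ s.1 then (p.2, p.1) else s)
      (n0, 0)).2

-- ===== PORT B =====
-- numbers[::-1] is List.reverse (PySem.List.slice?_none_none_neg_one); .index on it always
-- succeeds in Python since max_value ∈ numbers, so the none branch is unreachable.
def find_index_largest_value_alt (numbers : List Int) : Int :=
  match PySem.List.max? numbers (fun y => y) with
  | none => 0
  | some m =>
    match PySem.List.index? numbers.reverse m with
    | some i => (numbers.length : Int) - 1 - (i : Int)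
    | none => 0

-- ===== PRECONDITION & SPEC =====
def Spec_find_index_largest_value (numbers : List Int) (out : Int) : Prop := out = find_index_largest_value_alt numbers
instance (numbers : List Int) (out : Int) : Decidable (Spec_find_index_largest_value numbers out) := by unfold Spec_find_index_largest_value; infer_instance

-- ===== CLAIM (what is proved, stated in full; the proofs are below) =====
def Claim_equal_find_index_largest_value : Prop := ∀ (numbers : List Int), Dom_find_index_largest_value numbers → Spec_find_index_largest_value numbers (find_index_largest_value numbers)

-- ===== LEMMAS AND PROOFS =====

theorem fold_step_snoc (n0 x : Int) (ys : List Int) :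
    (PySem.List.enumerate (n0 :: (ys ++ [x])) 0).foldl
      (fun (s : Int × Int) (p : Int × Int) => if p.2 ≥ s.1 then (p.2, p.1) else s) (n0, 0)
    = (let F := (PySem.List.enumerate (n0 :: ys) 0).foldl
          (fun (s : Int × Int) (p : Int × Int) => if p.2 ≥ s.1 then (p.2, p.1) else s) (n0, 0)
       if x ≥ F.1 then (x, ((n0 :: ys).length : Int)) else F) := by
  rw [show (n0 :: (ys ++ [x])) = (n0 :: ys) ++ [x] from by simp,
    PySem.List.enumerate_append, List.foldl_append]
  simp only [PySem.List.enumerate_cons, PySem.List.enumerate_nil, List.foldl_cons,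
    List.foldl_nil, zero_add]

theorem alt_eq (l : List Int) (m : Int) (i : Nat)
    (hm : PySem.List.max? l (fun y => y) = some m)
    (hi : PySem.List.index? l.reverse m = some i) :
    find_index_largest_value_alt l = (l.length : Int) - 1 - (i : Int) := by
  unfold find_index_largest_value_alt
  rw [hm]
  dsimp only
  rw [hi]

theorem main_invariant (n0 : Int) (xs : List Int) :
    ((PySem.List.enumerate (n0 :: xs) 0).foldl
      (fun (s : Int × Int) (p : Int × Int) => if p.2 ≥ s.1 then (p.2, p.1) else s) (n0, 0)).1
      = xs.foldl max n0
    ∧ ((PySem.List.enumerate (n0 :: xs) 0).foldl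
      (fun (s : Int × Int) (p : Int × Int) => if p.2 ≥ s.1 then (p.2, p.1) else s) (n0, 0)).2
      = find_index_largest_value_alt (n0 :: xs) := by
  induction xs using List.reverseRecOn with
  | nil =>
      have hi : PySem.List.index? ([n0] : List Int).reverse n0 = some 0 := by
        rw [List.reverse_singleton]; exact PySem.List.index?_cons_self n0 []
      rw [alt_eq [n0] n0 0 (PySem.List.max?_id_cons n0 []) hi]
      constructor <;>
        simp [PySem.List.enumerate_cons, PySem.List.enumerate_nil]
  | append_singleton ys x ih =>
      obtain ⟨ih1, ih2⟩ := ih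
      rw [fold_step_snoc]
      have hmaxys : PySem.List.max? (n0 :: ys) (fun y => y)
          = some (ys.foldl max n0) := PySem.List.max?_id_cons n0 ys
      have hmem : ys.foldl max n0 ∈ n0 :: ys := PySem.List.max?_mem hmaxys
      have hfold : (ys ++ [x]).foldl max n0 = max (ys.foldl max n0) x := by
        simp [List.foldl_append]
      have hrev : (n0 :: (ys ++ [x])).reverse = x :: (n0 :: ys).reverse := by simp
      by_cases hc : x ≥ ys.foldl max n0
      · have hm : (ys ++ [x]).foldl max n0 = x := by
          rw [hfold]; exact max_eq_right hc
        have hmax : PySem.List.max? (n0 :: (ys ++ [x])) (fun y => y) = some x := by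
          rw [PySem.List.max?_id_cons n0 (ys ++ [x]), hm]
        have hi : PySem.List.index? (n0 :: (ys ++ [x])).reverse x = some 0 := by
          rw [hrev]; exact PySem.List.index?_cons_self x _
        rw [alt_eq (n0 :: (ys ++ [x])) x 0 hmax hi]
        dsimp only
        rw [ih1, if_pos hc]
        refine ⟨by rw [hm], ?_⟩
        simp only [List.length_cons, List.length_append, List.length_nil]
        push_cast
        omega
      · have hm : (ys ++ [x]).foldl max n0 = ys.foldl max n0 := by
          rw [hfold]; exact max_eq_left (le_of_not_ge hc)
        have hmax : PySem.List.max? (n0 :: (ys ++ [x])) (fun y => y)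
            = some (ys.foldl max n0) := by
          rw [PySem.List.max?_id_cons n0 (ys ++ [x]), hm]
        have hne : x ≠ ys.foldl max n0 := by omega
        have hmemrev : ys.foldl max n0 ∈ (n0 :: ys).reverse := List.mem_reverse.mpr hmem
        obtain ⟨i, hi⟩ := Option.isSome_iff_exists.mp
          ((PySem.List.index?_isSome_iff _ _).mpr hmemrev)
        have hi' : PySem.List.index? (n0 :: (ys ++ [x])).reverse (ys.foldl max n0)
            = some (i + 1) := by
          rw [hrev, PySem.List.index?_cons_of_ne _ hne, hi]; rfl
        rw [alt_eq (n0 :: (ys ++ [x])) (ys.foldl max n0) (i + 1) hmax hi']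
        rw [alt_eq (n0 :: ys) (ys.foldl max n0) i hmaxys hi] at ih2
        dsimp only
        rw [ih1, if_neg hc]
        refine ⟨by rw [ih1, hm], ?_⟩
        rw [ih2]
        simp only [List.length_cons, List.length_append, List.length_cons, List.length_nil]
        push_cast
        omega

-- ===== VERDICT (by name: the statement is the Claim_ definition above) =====
theorem find_index_largest_value_spec : Claim_equal_find_index_largest_value := by
  intro numbers _
  unfold Spec_find_index_largest_value
  match numbers with
  | [] => rfl
  | n0 :: xs =>
      exact (main_invariant n0 xs).2
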